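-- pv_equiv track=rewrite | github.com/ArtemKushnir/spbu_pyhton_sem1 | src/Homeworks/Homework4/floating_numbers.py | convert_to_normal_form_whole_part
-- ===== SOURCE A (Python) =====
-- def convert_to_normal_form_whole_part(whole_part, format_order):
--     result = ""
--     if whole_part == 0:
--         return "0", 0
--     while whole_part != 0:
--         result += str(whole_part % 2)
--         whole_part //= 2
--     order = len(result)
--     if not (format_order[0] <= order <= format_order[1]):
--         raise ValueError("incorrect number")
--     return "0." + result[::-1], order
-- ===== SOURCE B (Python) =====
-- def convert_to_normal_form_whole_part(whole_part, format_order):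
--     if whole_part == 0:
--         return "0", 0
--     digits = format(whole_part, "b")
--     order = len(digits)
--     if not (format_order[0] <= order <= format_order[1]):
--         raise ValueError("incorrect number")
--     return "0." + digits, order
-- ===== Notes on version B (the rewrite author's own statement) =====
-- stated objective: idiomatic
-- what changed: replaces the hand-rolled repeated-division-and-reverse loop with the builtin closed-form conversion format(whole_part, 'b'), which yields the digits most-significant-first directly
import Mathlib
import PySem

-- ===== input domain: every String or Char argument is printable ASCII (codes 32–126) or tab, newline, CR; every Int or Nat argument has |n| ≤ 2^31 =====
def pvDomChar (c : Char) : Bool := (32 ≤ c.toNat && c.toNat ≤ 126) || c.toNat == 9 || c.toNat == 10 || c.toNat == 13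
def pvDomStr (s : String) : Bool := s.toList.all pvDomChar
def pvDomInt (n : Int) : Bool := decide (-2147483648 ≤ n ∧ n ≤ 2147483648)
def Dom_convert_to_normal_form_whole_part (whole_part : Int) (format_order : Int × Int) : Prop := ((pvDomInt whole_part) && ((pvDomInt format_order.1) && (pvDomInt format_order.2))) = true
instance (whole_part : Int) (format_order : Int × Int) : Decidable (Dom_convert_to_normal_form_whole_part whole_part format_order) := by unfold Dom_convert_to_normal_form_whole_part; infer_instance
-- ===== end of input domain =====

-- B replaces A's repeated-division ''while'' loop (LSB-first string, reversed at the end)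
-- with the builtin closed-form conversion format(whole_part, "b"); objective: idiomatic.
-- Both Pythons raise ValueError when the bit count is outside format_order, and A loops
-- forever on negative whole_part; Pre_ excludes exactly those inputs.

-- ===== PORT A =====
-- the ''while whole_part != 0'' loop; Python diverges for whole_part < 0, so the guard
-- ''0 < whole_part'' (equivalent to ''whole_part ≠ 0'' on the terminating inputs) only
-- totalises the recursion
def pvALoop (whole_part : Int) (result : String) : String :=
  if 0 < whole_part then
    pvALoop (PySem.Int.floordiv whole_part 2) (result ++ PySem.Int.toStr (PySem.Int.mod whole_part 2))
  else result
termination_by whole_part.toNat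
decreasing_by
  rw [PySem.Int.floordiv_eq_ediv_of_pos (by omega : (0:Int) < 2)]
  omega

def convert_to_normal_form_whole_part (whole_part : Int) (format_order : Int × Int) : String × Int :=
  if whole_part = 0 then ("0", 0)
  else
    let result := pvALoop whole_part ""
    let order : Int := PySem.Str.len result
    -- raise ValueError when ¬ (format_order.1 ≤ order ≤ format_order.2): excluded by Pre_
    ("0." ++ ((PySem.Str.slice? result none none (-1)).getD ""), order)

-- ===== PORT B =====
def convert_to_normal_form_whole_part_alt (whole_part : Int) (format_order : Int × Int) : String × Int :=
  if whole_part = 0 then ("0", 0)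
  else
    let digits := PySem.Int.toBin whole_part      -- format(whole_part, "b")
    let order : Int := PySem.Str.len digits
    -- raise ValueError when ¬ (format_order.1 ≤ order ≤ format_order.2): excluded by Pre_
    ("0." ++ digits, order)

-- ===== PRECONDITION & SPEC =====
-- Pre_ excludes whole_part < 0, where A's while-loop never terminates, and the inputs
-- whose bit count lies outside [format_order.1, format_order.2], where A raises ValueError.
def Pre_convert_to_normal_form_whole_part (whole_part : Int) (format_order : Int × Int) : Prop :=
  0 ≤ whole_part ∧ (whole_part = 0 ∨
    (format_order.1 ≤ (PySem.Int.bitLength whole_part : Int) ∧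
     (PySem.Int.bitLength whole_part : Int) ≤ format_order.2))
instance (whole_part : Int) (format_order : Int × Int) : Decidable (Pre_convert_to_normal_form_whole_part whole_part format_order) := by unfold Pre_convert_to_normal_form_whole_part; infer_instance

def pvWitness_convert_to_normal_form_whole_part : Int × (Int × Int) := (5, (1, 10))

def Spec_convert_to_normal_form_whole_part (whole_part : Int) (format_order : Int × Int) (out : String × Int) : Prop := out = convert_to_normal_form_whole_part_alt whole_part format_order
instance (whole_part : Int) (format_order : Int × Int) (out : String × Int) : Decidable (Spec_convert_to_normal_form_whole_part whole_part format_order out) := by unfold Spec_convert_to_normal_form_whole_part; infer_instance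

-- ===== CLAIM (what is proved, stated in full; the proofs are below) =====
def Claim_equal_convert_to_normal_form_whole_part : Prop := ∀ (whole_part : Int) (format_order : Int × Int), Dom_convert_to_normal_form_whole_part whole_part format_order → Pre_convert_to_normal_form_whole_part whole_part format_order → Spec_convert_to_normal_form_whole_part whole_part format_order (convert_to_normal_form_whole_part whole_part format_order)

-- ===== LEMMAS AND PROOFS =====

-- MSB-first binary digits (what format(n, "b") produces for 0 < n)
def pvBin (n : Nat) : List Char :=
  if n < 2 then [Nat.digitChar n] else pvBin (n / 2) ++ [Nat.digitChar (n % 2)]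
decreasing_by omega

-- LSB-first binary digits (what A's loop appends)
def pvLsb (n : Nat) : List Char :=
  if n = 0 then [] else Nat.digitChar (n % 2) :: pvLsb (n / 2)
decreasing_by omega

lemma pvLsb_reverse (n : Nat) (h : 0 < n) : (pvLsb n).reverse = pvBin n := by
  induction n using Nat.strong_induction_on with
  | _ n ih =>
    rw [pvLsb, pvBin]
    rcases Nat.lt_or_ge n 2 with h2 | h2
    · interval_cases n
      simp [pvLsb, pvBin]
    · have hn : ¬ n = 0 := by omega
      have hlt : ¬ n < 2 := by omega
      simp only [hn, hlt, if_neg, ite_false, List.reverse_cons]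
      rw [ih (n / 2) (by omega) (by omega)]

lemma pvToDigitsCore_eq (fuel : Nat) : ∀ (n : Nat) (ds : List Char), n < fuel →
    Nat.toDigitsCore 2 fuel n ds = pvBin n ++ ds := by
  induction fuel with
  | zero => intro n ds h; omega
  | succ fuel ih =>
    intro n ds h
    rw [Nat.toDigitsCore]
    rcases Nat.lt_or_ge n 2 with h2 | h2
    · have hd : n / 2 = 0 := by omega
      have hm' : n % 2 = n := by omega
      conv_rhs => rw [pvBin, if_pos h2]
      simp [hd, hm']
    · have hne : ¬ n / 2 = 0 := by omega
      simp only [hne, ite_false]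
      rw [ih (n / 2) _ (by omega)]
      conv_rhs => rw [pvBin, if_neg (show ¬ n < 2 by omega)]
      simp
lemma pvToDigits_two_eq (n : Nat) : Nat.toDigits 2 n = pvBin n := by
  rw [Nat.toDigits, pvToDigitsCore_eq (n + 1) n [] (by omega), List.append_nil]

lemma pvToChars_mod_two (n : Nat) :
    PySem.Int.toChars ((n : Int) % 2) = [Nat.digitChar (n % 2)] := by
  have h : ((n : Int) % 2) = ((n % 2 : Nat) : Int) := by omega
  rw [h]
  rcases Nat.mod_two_eq_zero_or_one n with h2 | h2 <;> rw [h2] <;> decide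

lemma pvALoop_toList (n : Nat) : ∀ res : String,
    (pvALoop (n : Int) res).toList = res.toList ++ pvLsb n := by
  induction n using Nat.strong_induction_on with
  | _ n ih =>
    intro res
    rw [pvALoop]
    by_cases h : n = 0
    · subst h; simp [pvLsb]
    · have hpos : (0 : Int) < (n : Int) := by omega
      have hdiv : PySem.Int.floordiv ((n : Int)) 2 = (((n / 2 : Nat)) : Int) := by
        exact_mod_cast PySem.Int.floordiv_natCast n 2
      rw [if_pos hpos, hdiv, ih (n / 2) (by omega)]
      conv_rhs => rw [pvLsb, if_neg h]
      simp [pvToChars_mod_two, String.toList_append]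

lemma pvString_eq_of_toList {s t : String} (h : s.toList = t.toList) : s = t :=
  String.toList_inj.mp h

-- ===== VERDICT (by name: the statement is the Claim_ definition above) =====
theorem convert_to_normal_form_whole_part_spec : Claim_equal_convert_to_normal_form_whole_part := by
  intro whole_part format_order _ hpre
  unfold Spec_convert_to_normal_form_whole_part
  unfold convert_to_normal_form_whole_part convert_to_normal_form_whole_part_alt
  by_cases h0 : whole_part = 0
  · simp [h0]
  · rw [if_neg h0, if_neg h0]
    obtain ⟨hnn, _⟩ := hpre
    obtain ⟨m, rfl⟩ : ∃ m : Nat, whole_part = (m : Int) := ⟨whole_part.toNat, by omega⟩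
    have hm : 0 < m := by omega
    have hres : (pvALoop (m : Int) "").toList = pvLsb m := by
      simpa using pvALoop_toList m ""
    have hdig : (PySem.Int.toBin (m : Int)).toList = pvBin m := by
      rw [PySem.Int.toList_toBin, PySem.Int.toBinChars]
      rw [if_neg (by omega)]
      simp only [Int.toNat_natCast]
      exact pvToDigits_two_eq m
    dsimp only
    refine Prod.ext ?_ ?_
    · -- the String components
      rw [PySem.Str.slice?_none_none_neg_one, Option.getD_some]
      apply pvString_eq_of_toList
      have hofList : (String.ofList ((pvALoop (m : Int) "").toList.reverse)).toList
          = (pvALoop (m : Int) "").toList.reverse := by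
        simp
      calc ("0." ++ String.ofList ((pvALoop (m : Int) "").toList.reverse)).toList
          = "0.".toList ++ (pvALoop (m : Int) "").toList.reverse := by
            rw [String.toList_append, hofList]
        _ = "0.".toList ++ (PySem.Int.toBin (m : Int)).toList := by
            rw [hres, hdig, pvLsb_reverse m hm]
        _ = ("0." ++ PySem.Int.toBin (m : Int)).toList := by rw [String.toList_append]
    · -- the Int components: both are the digit-list length
      rw [PySem.Str.len_eq, PySem.Str.len_eq, hres, hdig,
        ← pvLsb_reverse m hm, List.length_reverse]
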